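-- pv_equiv track=rewrite | github.com/dkassin/interview_prep | chap_12_dictionaries/min_index_of _two_list.py | min_index_of_two_list
-- ===== SOURCE A (Python) =====
-- def min_index_of_two_list(list1, list2):
--     hash_2 = {}
--     for j in range(len(list2)):
--         hash_2[list2[j]] = j
--
--     min_index = 10000000000
--     result = []
--     for i in range(len(list1)):
--         if list1[i] in hash_2:
--             value = i + hash_2[list1[i]]
--             if value < min_index:
--                 result = [list1[i]]
--                 min_index = value
--             elif value == min_index:
--                 result.append(list1[i])
--     return result
-- ===== SOURCE B (Python) =====
-- def min_index_of_two_list(list1, list2):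
--     idx2 = {x: j for j, x in enumerate(list2)}
--     cands = [(i + idx2[x], x) for i, x in enumerate(list1) if x in idx2]
--     m = min([v for v, _ in cands] + [10000000000])
--     return [x for v, x in cands if v == m]
-- ===== Notes on version B (the rewrite author's own statement) =====
-- stated objective: alternative
-- what changed: B materialises the list of candidate index-sums in one comprehension and then reduces it with a single min() plus a filter, instead of A's interleaved running-minimum loop that rebuilds/appends to the result in place.
import Mathlib
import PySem

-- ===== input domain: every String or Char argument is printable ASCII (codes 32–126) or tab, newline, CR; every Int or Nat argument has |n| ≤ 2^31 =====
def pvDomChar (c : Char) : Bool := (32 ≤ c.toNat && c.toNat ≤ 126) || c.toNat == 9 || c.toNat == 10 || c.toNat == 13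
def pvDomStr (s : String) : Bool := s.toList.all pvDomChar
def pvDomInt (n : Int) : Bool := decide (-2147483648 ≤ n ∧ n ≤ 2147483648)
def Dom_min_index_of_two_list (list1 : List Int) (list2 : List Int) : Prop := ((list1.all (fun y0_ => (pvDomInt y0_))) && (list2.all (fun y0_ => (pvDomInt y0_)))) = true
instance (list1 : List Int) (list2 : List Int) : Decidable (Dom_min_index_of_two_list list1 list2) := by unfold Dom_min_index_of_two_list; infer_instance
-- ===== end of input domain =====

-- B replaces A's interleaved running-minimum/result-rebuilding loop by a candidate list built once and reduced with min() plus a filter (objective: alternative decomposition, same cost).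


-- ===== PORT A =====
def min_index_of_two_list (list1 : List Int) (list2 : List Int) : List Int :=
  let hash_2 : PySem.Dict Int Int :=
    (PySem.List.enumerate list2).foldl (fun d jx => d.insert jx.2 jx.1) PySem.Dict.empty
  let st :=
    (PySem.List.enumerate list1).foldl
      (fun (st : Int × List Int) ix =>
        match hash_2.get? ix.2 with
        | none => st
        | some j =>
          let value := ix.1 + j
          if value < st.1 then (value, [ix.2])
          else if value = st.1 then (st.1, st.2 ++ [ix.2])
          else st)
      ((10000000000 : Int), ([] : List Int))
  st.2

-- ===== PORT B =====
def min_index_of_two_list_alt (list1 : List Int) (list2 : List Int) : List Int :=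
  let idx2 : PySem.Dict Int Int :=
    (PySem.List.enumerate list2).foldl (fun d jx => d.insert jx.2 jx.1) PySem.Dict.empty
  let cands : List (Int × Int) :=
    (PySem.List.enumerate list1).filterMap
      (fun ix => (idx2.get? ix.2).map (fun j => (ix.1 + j, ix.2)))
  match PySem.List.min? (cands.map (fun p => p.1) ++ [(10000000000 : Int)]) (fun y => y) with
  | some m => (cands.filter (fun p => p.1 == m)).map (fun p => p.2)
  | none => []

-- ===== PRECONDITION & SPEC =====
def Spec_min_index_of_two_list (list1 : List Int) (list2 : List Int) (out : List Int) : Prop := out = min_index_of_two_list_alt list1 list2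
instance (list1 : List Int) (list2 : List Int) (out : List Int) : Decidable (Spec_min_index_of_two_list list1 list2 out) := by unfold Spec_min_index_of_two_list; infer_instance

-- ===== CLAIM (what is proved, stated in full; the proofs are below) =====
def Claim_equal_min_index_of_two_list : Prop := ∀ (list1 : List Int) (list2 : List Int), Dom_min_index_of_two_list list1 list2 → Spec_min_index_of_two_list list1 list2 (min_index_of_two_list list1 list2)

-- ===== LEMMAS AND PROOFS =====

-- helper abbreviations for the proof
def pvStep (d : PySem.Dict Int Int) (st : Int × List Int) (ix : Int × Int) : Int × List Int :=
  match d.get? ix.2 with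
  | none => st
  | some j =>
    let value := ix.1 + j
    if value < st.1 then (value, [ix.2])
    else if value = st.1 then (st.1, st.2 ++ [ix.2])
    else st

def pvCands (d : PySem.Dict Int Int) (l : List (Int × Int)) : List (Int × Int) :=
  l.filterMap (fun ix => (d.get? ix.2).map (fun j => (ix.1 + j, ix.2)))

lemma foldl_min_le (l : List Int) (a : Int) : l.foldl min a ≤ a := by
  induction l generalizing a with
  | nil => exact le_refl a
  | cons x t ih => exact le_trans (ih (min a x)) (min_le_left a x)

lemma foldl_min_comm (t : List Int) (a b : Int) :
    min (t.foldl min a) b = t.foldl min (min a b) := by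
  induction t generalizing a with
  | nil => rfl
  | cons x t ih =>
    simp only [List.foldl_cons]
    rw [ih (min a x)]
    have : min (min a x) b = min (min a b) x := by
      rw [min_assoc, min_comm x b, ← min_assoc]
    rw [this]

lemma min?_append_single (vs : List Int) (c : Int) :
    PySem.List.min? (vs ++ [c]) (fun y => y) = some (vs.foldl min c) := by
  cases vs with
  | nil => simp [PySem.List.min?]
  | cons v t =>
    rw [List.cons_append, PySem.List.min?_id_cons, List.foldl_append]
    simp only [List.foldl_cons, List.foldl_nil, List.foldl]
    rw [foldl_min_comm t v c, min_comm v c, ← foldl_min_comm, foldl_min_comm]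

lemma pvCands_cons_some (d : PySem.Dict Int Int) (ix : Int × Int) (t : List (Int × Int))
    (j : Int) (hg : d.get? ix.2 = some j) :
    pvCands d (ix :: t) = (ix.1 + j, ix.2) :: pvCands d t := by
  simp [pvCands, List.filterMap_cons, hg]

lemma pvCands_cons_none (d : PySem.Dict Int Int) (ix : Int × Int) (t : List (Int × Int))
    (hg : d.get? ix.2 = none) :
    pvCands d (ix :: t) = pvCands d t := by
  simp [pvCands, List.filterMap_cons, hg]

lemma loopA (d : PySem.Dict Int Int) (l : List (Int × Int)) (m0 : Int) (r0 : List Int) :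
    l.foldl (pvStep d) (m0, r0) =
      (((pvCands d l).map (fun p => p.1)).foldl min m0,
       (if ((pvCands d l).map (fun p => p.1)).foldl min m0 = m0 then r0 else []) ++
         ((pvCands d l).filter (fun p => p.1 == ((pvCands d l).map (fun p => p.1)).foldl min m0)).map
           (fun p => p.2)) := by
  induction l generalizing m0 r0 with
  | nil => simp [pvCands]
  | cons ix t ih =>
    cases hg : d.get? ix.2 with
    | none =>
      rw [List.foldl_cons, pvCands_cons_none d ix t hg]
      have hstep : pvStep d (m0, r0) ix = (m0, r0) := by simp [pvStep, hg]
      rw [hstep]; exact ih m0 r0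
    | some j =>
      rw [List.foldl_cons, pvCands_cons_some d ix t j hg, List.map_cons, List.foldl_cons,
        List.filter_cons]
      have hstep : pvStep d (m0, r0) ix =
          (if ix.1 + j < m0 then (ix.1 + j, [ix.2])
           else if ix.1 + j = m0 then (m0, r0 ++ [ix.2]) else (m0, r0)) := by
        simp only [pvStep, hg]
      rw [hstep]
      set v := ix.1 + j with hv
      by_cases h1 : v < m0
      · rw [if_pos h1, ih v [ix.2], min_eq_right (le_of_lt h1)]
        set M := ((pvCands d t).map (fun p => p.1)).foldl min v with hM
        have hle : M ≤ v := foldl_min_le _ _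
        have hne : ¬ M = m0 := fun he => absurd (lt_of_le_of_lt (he ▸ hle) h1) (lt_irrefl m0)
        rw [if_neg hne]
        by_cases h2 : M = v
        · rw [if_pos h2, show (v == M) = true by simp [beq_iff_eq, h2]]
          simp
        · rw [if_neg h2, show (v == M) = false by simp [beq_iff_eq]; exact fun h => h2 h.symm]
          simp
      · rw [if_neg h1]
        by_cases h2 : v = m0
        · rw [if_pos h2, ih m0 (r0 ++ [ix.2]), show min m0 v = m0 by rw [h2]; exact min_self m0]
          set M := ((pvCands d t).map (fun p => p.1)).foldl min m0 with hM
          by_cases h3 : M = m0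
          · rw [if_pos h3, if_pos h3, show (v == M) = true by simp [beq_iff_eq, h2, h3]]
            simp
          · rw [if_neg h3, if_neg h3,
              show (v == M) = false by simp [beq_iff_eq, h2]; exact fun h => h3 h.symm]
            simp
        · rw [if_neg h2, ih m0 r0]
          have h1' : m0 < v := lt_of_le_of_ne (not_lt.mp h1) (fun h => h2 h.symm)
          rw [show min m0 v = m0 from min_eq_left (le_of_lt h1')]
          set M := ((pvCands d t).map (fun p => p.1)).foldl min m0 with hM
          have hle : M ≤ m0 := foldl_min_le _ _
          rw [show (v == M) = false by
            simp [beq_iff_eq]; intro h; rw [h] at h1'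
            exact absurd (lt_of_le_of_lt hle h1') (lt_irrefl _)]
          simp

theorem min_index_of_two_list_eq (list1 list2 : List Int) :
    min_index_of_two_list list1 list2 = min_index_of_two_list_alt list1 list2 := by
  unfold min_index_of_two_list min_index_of_two_list_alt
  set d : PySem.Dict Int Int :=
    (PySem.List.enumerate list2).foldl (fun d jx => d.insert jx.2 jx.1) PySem.Dict.empty with hd
  show (((PySem.List.enumerate list1).foldl (pvStep d) ((10000000000 : Int), ([] : List Int)))).2 = _
  rw [loopA d (PySem.List.enumerate list1) 10000000000 []]
  simp only [pvCands]
  rw [min?_append_single]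
  simp

-- ===== VERDICT (by name: the statement is the Claim_ definition above) =====
theorem min_index_of_two_list_spec : Claim_equal_min_index_of_two_list := by
  intro list1 list2 _
  unfold Spec_min_index_of_two_list
  exact min_index_of_two_list_eq list1 list2
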